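-- pv_equiv track=rewrite | github.com/leduytuanvu/avf-vending-api | tools/telemetry-load/storm_accounting.py | count_duplicate_replays
-- ===== SOURCE A (Python) =====
-- def is_critical_event(idx: int, wave: int, critical_pct: int) -> bool:
--     bucket = (idx * 10007 + wave * 7919) % 100
--     return bucket < critical_pct
--
-- def count_duplicate_replays(
--     machine_count: int, events_per_machine: int, critical_pct: int, dup_pct: int
-- ) -> int:
--     """Extra identical critical publishes (second delivery) planned by the storm script."""
--     if dup_pct <= 0:
--         return 0
--     n = 0
--     for wave in range(1, events_per_machine + 1):
--         for idx in range(1, machine_count + 1):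
--             if not is_critical_event(idx, wave, critical_pct):
--                 continue
--             b = (idx * 131 + wave * 171) % 100
--             if b < dup_pct:
--                 n += 1
--     return n
-- ===== SOURCE B (Python) =====
-- def _residue_count(m, r):
--     """How many i in range(1, m+1) have i % 100 == r (0 <= r < 100)."""
--     if m <= 0:
--         return 0
--     return m // 100 + (1 if 1 <= r <= m % 100 else 0)
--
-- def count_duplicate_replays(
--     machine_count: int, events_per_machine: int, critical_pct: int, dup_pct: int
-- ) -> int:
--     """Extra identical critical publishes (second delivery) planned by the storm script."""
--     if dup_pct <= 0:
--         return 0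
--     total = 0
--     for rw in range(100):
--         cw = _residue_count(events_per_machine, rw)
--         for ri in range(100):
--             if (ri * 10007 + rw * 7919) % 100 < critical_pct and (ri * 131 + rw * 171) % 100 < dup_pct:
--                 total += _residue_count(machine_count, ri) * cw
--     return total
-- ===== Notes on version B (the rewrite author's own statement) =====
-- stated objective: faster
-- what changed: Replaces the O(machines*events) double loop over every (idx, wave) pair by a closed-form count of indices in each residue class mod 100 and a fixed 100x100 sum over residue pairs.
import Mathlib
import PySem

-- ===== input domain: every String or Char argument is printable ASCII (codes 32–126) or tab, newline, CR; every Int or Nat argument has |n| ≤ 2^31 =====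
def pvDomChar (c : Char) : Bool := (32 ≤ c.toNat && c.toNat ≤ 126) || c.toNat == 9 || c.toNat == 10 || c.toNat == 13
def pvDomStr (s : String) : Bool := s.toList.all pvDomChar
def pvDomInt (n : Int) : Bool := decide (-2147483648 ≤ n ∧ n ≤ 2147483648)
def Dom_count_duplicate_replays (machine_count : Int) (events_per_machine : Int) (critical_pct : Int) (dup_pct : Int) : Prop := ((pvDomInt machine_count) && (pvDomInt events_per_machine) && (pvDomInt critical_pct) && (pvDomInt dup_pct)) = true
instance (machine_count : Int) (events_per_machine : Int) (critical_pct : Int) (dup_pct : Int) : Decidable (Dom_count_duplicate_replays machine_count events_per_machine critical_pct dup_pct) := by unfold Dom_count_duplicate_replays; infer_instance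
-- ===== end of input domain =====

-- B replaces A's O(machine_count·events_per_machine) double loop by a closed-form
-- count of indices per residue class mod 100 and a fixed 100×100 sum over residue pairs.

-- ===== PORT A =====
def is_critical_event (idx : Int) (wave : Int) (critical_pct : Int) : Bool :=
  decide (PySem.Int.mod (idx * 10007 + wave * 7919) 100 < critical_pct)

def count_duplicate_replays (machine_count : Int) (events_per_machine : Int) (critical_pct : Int) (dup_pct : Int) : Int :=
  if dup_pct ≤ 0 then 0
  else
    (PySem.List.pyRange 1 (events_per_machine + 1) 1).foldl (fun n wave =>
      (PySem.List.pyRange 1 (machine_count + 1) 1).foldl (fun n idx =>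
        if !(is_critical_event idx wave critical_pct) then n
        else if PySem.Int.mod (idx * 131 + wave * 171) 100 < dup_pct then n + 1 else n) n) 0

-- ===== PORT B =====
-- how many i in range(1, m+1) have i % 100 == r  (closed form)
def residueCount (m : Int) (r : Int) : Int :=
  if m ≤ 0 then 0
  else PySem.Int.floordiv m 100 + (if 1 ≤ r ∧ r ≤ PySem.Int.mod m 100 then 1 else 0)

def count_duplicate_replays_alt (machine_count : Int) (events_per_machine : Int) (critical_pct : Int) (dup_pct : Int) : Int :=
  if dup_pct ≤ 0 then 0
  else
    (PySem.List.pyRange 0 100 1).foldl (fun total rw =>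
      let cw := residueCount events_per_machine rw
      (PySem.List.pyRange 0 100 1).foldl (fun total ri =>
        if PySem.Int.mod (ri * 10007 + rw * 7919) 100 < critical_pct ∧
           PySem.Int.mod (ri * 131 + rw * 171) 100 < dup_pct
        then total + residueCount machine_count ri * cw else total) total) 0

-- ===== PRECONDITION & SPEC =====
def Spec_count_duplicate_replays (machine_count : Int) (events_per_machine : Int) (critical_pct : Int) (dup_pct : Int) (out : Int) : Prop := out = count_duplicate_replays_alt machine_count events_per_machine critical_pct dup_pct
instance (machine_count : Int) (events_per_machine : Int) (critical_pct : Int) (dup_pct : Int) (out : Int) : Decidable (Spec_count_duplicate_replays machine_count events_per_machine critical_pct dup_pct out) := by unfold Spec_count_duplicate_replays; infer_instance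

-- ===== CLAIM (what is proved, stated in full; the proofs are below) =====
def Claim_equal_count_duplicate_replays : Prop := ∀ (machine_count : Int) (events_per_machine : Int) (critical_pct : Int) (dup_pct : Int), Dom_count_duplicate_replays machine_count events_per_machine critical_pct dup_pct → Spec_count_duplicate_replays machine_count events_per_machine critical_pct dup_pct (count_duplicate_replays machine_count events_per_machine critical_pct dup_pct)

-- ===== LEMMAS AND PROOFS =====

-- 0/1 indicator of "critical and duplicated" for a residue pair
def pvF (critical_pct : Int) (dup_pct : Int) (ri : Int) (rw : Int) : Int :=
  if PySem.Int.mod (ri * 10007 + rw * 7919) 100 < critical_pct ∧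
     PySem.Int.mod (ri * 131 + rw * 171) 100 < dup_pct then 1 else 0

-- the two bucket hashes only depend on idx % 100 and wave % 100
lemma mod100_reduce (a b c d : Int) :
    PySem.Int.mod (a * c + b * d) 100
      = PySem.Int.mod (PySem.Int.mod a 100 * c + PySem.Int.mod b 100 * d) 100 := by
  have h1 := PySem.Int.floordiv_mul_add_mod a 100
  have h2 := PySem.Int.floordiv_mul_add_mod b 100
  have h100 : (0:Int) < 100 := by norm_num
  rw [PySem.Int.mod_eq_emod_of_pos h100, PySem.Int.mod_eq_emod_of_pos h100]
  have key : PySem.Int.mod a 100 * c + PySem.Int.mod b 100 * d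
      = a * c + b * d + 100 * (-(PySem.Int.floordiv a 100 * c) - PySem.Int.floordiv b 100 * d) := by
    linear_combination c * h1 + d * h2
  rw [key, Int.add_mul_emod_self_left]

-- List.range sum as a Finset.range sum (definitional)
lemma list_range_sum (n : Nat) (f : Nat → Int) :
    ((List.range n).map f).sum = ∑ r ∈ Finset.range n, f r := rfl

lemma residueCount_succ (n : Nat) (r : Nat) (hr : r < 100) :
    residueCount ((n:Int)+1) (r:Int)
      = residueCount (n:Int) (r:Int)
        + (if (r:Int) = PySem.Int.mod ((n:Int)+1) 100 then 1 else 0) := by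
  have h100 : (0:Int) < 100 := by norm_num
  unfold residueCount
  rw [PySem.Int.mod_eq_emod_of_pos h100, PySem.Int.mod_eq_emod_of_pos h100,
      PySem.Int.floordiv_eq_ediv_of_pos h100, PySem.Int.floordiv_eq_ediv_of_pos h100]
  split_ifs <;> omega

-- the central counting lemma: a sum over i = 1..m of a function of i % 100
-- equals the residue-weighted sum over the 100 residue classes
lemma sum_mod_residues (m : Int) (h : Int → Int) :
    ((PySem.List.pyRange 1 (m+1) 1).map (fun i => h (PySem.Int.mod i 100))).sum
      = ∑ r ∈ Finset.range 100, residueCount m (r:Int) * h (r:Int) := by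
  by_cases hm : m ≤ 0
  · rw [PySem.List.pyRange_one_eq_nil (by omega)]
    simp [residueCount, hm]
  · have hnat : ∀ n : Nat,
        ((PySem.List.pyRange 1 ((n:Int)+1) 1).map (fun i => h (PySem.Int.mod i 100))).sum
          = ∑ r ∈ Finset.range 100, residueCount (n:Int) (r:Int) * h (r:Int) := by
      intro n
      induction n with
      | zero =>
        rw [PySem.List.pyRange_one_eq_nil (by omega)]
        simp [residueCount]
      | succ n ih =>
        have hcast : (((n+1 : Nat)):Int) + 1 = ((n:Int) + 1) + 1 := by push_cast; ring
        rw [hcast, PySem.List.pyRange_one_succ_right (by omega), List.map_append,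
            List.sum_append]
        have hstep : ∀ r ∈ Finset.range 100,
            residueCount (((n+1:Nat)):Int) (r:Int) * h (r:Int)
              = residueCount (n:Int) (r:Int) * h (r:Int)
                + (if (r:Int) = PySem.Int.mod ((n:Int)+1) 100 then h (r:Int) else 0) := by
          intro r hrmem
          have := residueCount_succ n r (Finset.mem_range.mp hrmem)
          push_cast [this]
          split_ifs <;> ring
        rw [Finset.sum_congr rfl hstep, Finset.sum_add_distrib, ← ih]
        -- the delta sum picks out the residue of n+1
        have hmod0 : (0:Int) ≤ PySem.Int.mod ((n:Int)+1) 100 := PySem.Int.mod_nonneg _ (by norm_num)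
        have hmodlt : PySem.Int.mod ((n:Int)+1) 100 < 100 := PySem.Int.mod_lt _ (by norm_num)
        set k : Nat := (PySem.Int.mod ((n:Int)+1) 100).toNat with hk
        have hkcast : (k:Int) = PySem.Int.mod ((n:Int)+1) 100 := by
          rw [hk]; exact Int.toNat_of_nonneg hmod0
        have hdelta : ∀ r ∈ Finset.range 100,
            (if (r:Int) = PySem.Int.mod ((n:Int)+1) 100 then h (r:Int) else 0)
              = (if r = k then h (r:Int) else 0) := by
          intro r _
          rw [← hkcast]
          simp
        rw [Finset.sum_congr rfl hdelta, Finset.sum_ite_eq' (Finset.range 100) k]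
        have hkmem : k ∈ Finset.range 100 := by
          rw [Finset.mem_range]; omega
        rw [if_pos hkmem, hkcast]
        simp
    have hm' : m = ((m.toNat : Nat) : Int) := by omega
    rw [hm']; exact hnat m.toNat

-- A's inner loop over idx, rewritten as "accumulator plus a sum of indicators"
lemma inner_loop_eq (machine_count critical_pct dup_pct wave n : Int) :
    (PySem.List.pyRange 1 (machine_count + 1) 1).foldl (fun n idx =>
        if !(is_critical_event idx wave critical_pct) then n
        else if PySem.Int.mod (idx * 131 + wave * 171) 100 < dup_pct then n + 1 else n) n
      = n + ((PySem.List.pyRange 1 (machine_count + 1) 1).map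
          (fun idx => pvF critical_pct dup_pct (PySem.Int.mod idx 100) (PySem.Int.mod wave 100))).sum := by
  have hfun : (fun (n idx : Int) =>
        if !(is_critical_event idx wave critical_pct) then n
        else if PySem.Int.mod (idx * 131 + wave * 171) 100 < dup_pct then n + 1 else n)
      = fun (n idx : Int) => n + pvF critical_pct dup_pct (PySem.Int.mod idx 100) (PySem.Int.mod wave 100) := by
    funext n idx
    unfold pvF is_critical_event
    rw [← mod100_reduce idx wave 10007 7919, ← mod100_reduce idx wave 131 171]
    simp only [PySem.Int.mod_eq_emod_of_pos (show (0:Int) < 100 by norm_num)]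
    by_cases h1 : (idx * 10007 + wave * 7919) % 100 < critical_pct <;>
      by_cases h2 : (idx * 131 + wave * 171) % 100 < dup_pct <;>
      simp [h1, h2]
  rw [hfun, PySem.List.foldl_add]

-- A as a residue-weighted double sum (for dup_pct > 0)
lemma a_as_residue_sum (machine_count events_per_machine critical_pct dup_pct : Int)
    (hdp : ¬ dup_pct ≤ 0) :
    count_duplicate_replays machine_count events_per_machine critical_pct dup_pct
      = ∑ rw ∈ Finset.range 100, residueCount events_per_machine (rw:Int) *
          ∑ ri ∈ Finset.range 100, residueCount machine_count (ri:Int) *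
            pvF critical_pct dup_pct (ri:Int) (rw:Int) := by
  unfold count_duplicate_replays
  rw [if_neg hdp]
  have houter : (fun (n wave : Int) =>
        (PySem.List.pyRange 1 (machine_count + 1) 1).foldl (fun n idx =>
          if !(is_critical_event idx wave critical_pct) then n
          else if PySem.Int.mod (idx * 131 + wave * 171) 100 < dup_pct then n + 1 else n) n)
      = fun (n wave : Int) => n +
          ∑ ri ∈ Finset.range 100, residueCount machine_count (ri:Int) *
            pvF critical_pct dup_pct (ri:Int) (PySem.Int.mod wave 100) := by
    funext n wave
    rw [inner_loop_eq]
    congr 1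
    exact sum_mod_residues machine_count (fun r => pvF critical_pct dup_pct r (PySem.Int.mod wave 100))
  rw [houter, PySem.List.foldl_add, zero_add]
  exact sum_mod_residues events_per_machine (fun rw => ∑ ri ∈ Finset.range 100,
    residueCount machine_count (ri:Int) * pvF critical_pct dup_pct (ri:Int) rw)

-- B as the same residue-weighted double sum (for dup_pct > 0)
lemma b_as_residue_sum (machine_count events_per_machine critical_pct dup_pct : Int)
    (hdp : ¬ dup_pct ≤ 0) :
    count_duplicate_replays_alt machine_count events_per_machine critical_pct dup_pct
      = ∑ rw ∈ Finset.range 100, residueCount events_per_machine (rw:Int) *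
          ∑ ri ∈ Finset.range 100, residueCount machine_count (ri:Int) *
            pvF critical_pct dup_pct (ri:Int) (rw:Int) := by
  unfold count_duplicate_replays_alt
  rw [if_neg hdp]
  have hinner : ∀ (rw total : Int),
      (PySem.List.pyRange 0 100 1).foldl (fun total ri =>
          if PySem.Int.mod (ri * 10007 + rw * 7919) 100 < critical_pct ∧
             PySem.Int.mod (ri * 131 + rw * 171) 100 < dup_pct
          then total + residueCount machine_count ri * residueCount events_per_machine rw
          else total) total
        = total + ∑ ri ∈ Finset.range 100, residueCount machine_count (ri:Int) *
            pvF critical_pct dup_pct (ri:Int) rw * residueCount events_per_machine rw := by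
    intro rw total
    have hfun : (fun (total ri : Int) =>
          if PySem.Int.mod (ri * 10007 + rw * 7919) 100 < critical_pct ∧
             PySem.Int.mod (ri * 131 + rw * 171) 100 < dup_pct
          then total + residueCount machine_count ri * residueCount events_per_machine rw
          else total)
        = fun (total ri : Int) => total + residueCount machine_count ri *
            pvF critical_pct dup_pct ri rw * residueCount events_per_machine rw := by
      funext total ri
      unfold pvF
      split_ifs <;> ring
    rw [hfun, PySem.List.foldl_add]
    congr 1
  have houter : (fun (total rw : Int) =>
        (PySem.List.pyRange 0 100 1).foldl (fun total ri =>
          if PySem.Int.mod (ri * 10007 + rw * 7919) 100 < critical_pct ∧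
             PySem.Int.mod (ri * 131 + rw * 171) 100 < dup_pct
          then total + residueCount machine_count ri * residueCount events_per_machine rw
          else total) total)
      = fun (total rw : Int) => total + ∑ ri ∈ Finset.range 100,
          residueCount machine_count (ri:Int) * pvF critical_pct dup_pct (ri:Int) rw *
            residueCount events_per_machine rw := by
    funext total rw
    exact hinner rw total
  rw [houter, PySem.List.foldl_add, zero_add]
  rw [PySem.List.pyRange_one 0 100, List.map_map,
      show ((100:Int) - 0).toNat = 100 from rfl, list_range_sum 100 _]
  refine Finset.sum_congr rfl fun rw _ => ?_
  simp only [Function.comp_apply, zero_add, Finset.mul_sum]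
  refine Finset.sum_congr rfl fun ri _ => ?_
  ring

-- ===== VERDICT (by name: the statement is the Claim_ definition above) =====
theorem count_duplicate_replays_spec : Claim_equal_count_duplicate_replays := by
  intro machine_count events_per_machine critical_pct dup_pct _
  unfold Spec_count_duplicate_replays
  by_cases hdp : dup_pct ≤ 0
  · unfold count_duplicate_replays count_duplicate_replays_alt
    rw [if_pos hdp, if_pos hdp]
  · rw [a_as_residue_sum _ _ _ _ hdp, b_as_residue_sum _ _ _ _ hdp]
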